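-- pv_equiv track=rewrite | github.com/KLiehr/WS2122---Feature-Aggregation-and-Clustering | ProjectApp/add_Attributes/add_D2.py | curValue
-- ===== SOURCE A (Python) =====
-- def curValue(trace, event, attr):
--
--     # denotes the latest value of the attribute
--     attr_Value = 'NotAssigned'
--     # denotes if we are before the event
--     before = True
--
--
--     for ev in trace:
--
--         if before:
--             # if the current event has the attribute, update attr_Value
--             if attr in ev:
--                 attr_Value = ev[attr]
--
--         # update before
--         if ev == event:
--             before = False
--
--         # return attr_Value if given event has been reached
--         if not before:
--             return attr_Value
--
--     return attr_Value
-- ===== SOURCE B (Python) =====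
-- def curValue(trace, event, attr):
--     # Build the inclusive prefix of the trace up to the first occurrence of `event`.
--     prefix = []
--     for ev in trace:
--         prefix.append(ev)
--         if ev == event:
--             break
--     # Latest-to-earliest: first event in reverse order carrying `attr` wins.
--     for ev in reversed(prefix):
--         if attr in ev:
--             return ev[attr]
--     return 'NotAssigned'
-- ===== Notes on version B (the rewrite author's own statement) =====
-- stated objective: alternative
-- what changed: Replaces A's single forward pass with a running value and a before-flag by two phases with no running state: build the inclusive prefix ending at the first occurrence of the event, then scan it in reverse and return the first attribute value found.
import Mathlib
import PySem

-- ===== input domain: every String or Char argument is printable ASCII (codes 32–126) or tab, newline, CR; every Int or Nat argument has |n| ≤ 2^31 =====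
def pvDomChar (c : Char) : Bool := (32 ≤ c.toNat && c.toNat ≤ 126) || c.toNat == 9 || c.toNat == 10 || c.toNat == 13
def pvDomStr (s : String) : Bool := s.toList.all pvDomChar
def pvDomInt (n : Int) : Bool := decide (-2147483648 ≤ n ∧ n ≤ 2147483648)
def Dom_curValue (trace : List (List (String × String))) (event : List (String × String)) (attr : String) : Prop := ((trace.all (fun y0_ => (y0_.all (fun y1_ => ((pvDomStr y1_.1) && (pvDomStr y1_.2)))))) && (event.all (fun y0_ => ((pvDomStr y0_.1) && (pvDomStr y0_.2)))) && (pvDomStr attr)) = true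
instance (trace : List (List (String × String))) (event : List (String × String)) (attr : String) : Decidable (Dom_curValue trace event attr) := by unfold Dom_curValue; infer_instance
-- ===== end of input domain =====

-- ===== PORT A =====
-- B restates A as two stateless phases (cut inclusive prefix at the event, then reverse search); alternative decomposition, not faster.
-- Python `==` on dicts ignores insertion order: compared as maps (first-match lookup both ways); exact for dict arguments.
def pyDictEq (d e : List (String × String)) : Bool :=
  d.all (fun p => List.lookup p.1 e == List.lookup p.1 d) &&
  e.all (fun p => List.lookup p.1 d == List.lookup p.1 e)

-- the for-loop of A: running latest value; `before` is always true at the top of an iteration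
-- (the loop returns as soon as it becomes false), so the early return is the `pyDictEq` branch.
def curValueGo (event : List (String × String)) (attr : String) :
    String → List (List (String × String)) → String
  | attrValue, [] => attrValue
  | attrValue, ev :: rest =>
    let v := if (List.lookup attr ev).isSome then (List.lookup attr ev).getD attrValue else attrValue
    if pyDictEq ev event then v else curValueGo event attr v rest

def curValue (trace : List (List (String × String))) (event : List (String × String)) (attr : String) : String :=
  curValueGo event attr "NotAssigned" trace

-- ===== PORT B =====
-- first loop of B: the inclusive prefix up to the first occurrence of `event` (append, then break)
def cutPrefix (event : List (String × String)) :
    List (List (String × String)) → List (List (String × String))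
  | [] => []
  | ev :: rest => if pyDictEq ev event then [ev] else ev :: cutPrefix event rest

-- second loop of B, run on the reversed prefix: first event carrying `attr` wins
def lastAttr (attr : String) : List (List (String × String)) → String
  | [] => "NotAssigned"
  | ev :: rest =>
    match List.lookup attr ev with
    | some v => v
    | none => lastAttr attr rest

def curValue_alt (trace : List (List (String × String))) (event : List (String × String)) (attr : String) : String :=
  lastAttr attr (cutPrefix event trace).reverse

-- ===== PRECONDITION & SPEC =====
def Spec_curValue (trace : List (List (String × String))) (event : List (String × String)) (attr : String) (out : String) : Prop := out = curValue_alt trace event attr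
instance (trace : List (List (String × String))) (event : List (String × String)) (attr : String) (out : String) : Decidable (Spec_curValue trace event attr out) := by unfold Spec_curValue; infer_instance

-- ===== CLAIM (what is proved, stated in full; the proofs are below) =====
def Claim_equal_curValue : Prop := ∀ (trace : List (List (String × String))) (event : List (String × String)) (attr : String), Dom_curValue trace event attr → Spec_curValue trace event attr (curValue trace event attr)

-- ===== LEMMAS AND PROOFS =====
-- Option view of B's reverse search, used only by the proof
def lastAttr? (attr : String) : List (List (String × String)) → Option String
  | [] => none
  | ev :: rest => (List.lookup attr ev).orElse (fun _ => lastAttr? attr rest)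

theorem lastAttr_eq_getD (attr : String) (l : List (List (String × String))) :
    lastAttr attr l = (lastAttr? attr l).getD "NotAssigned" := by
  induction l with
  | nil => rfl
  | cons ev rest ih =>
    simp only [lastAttr, lastAttr?]
    cases List.lookup attr ev <;> simp [ih]

theorem lastAttr?_append (attr : String) (a b : List (List (String × String))) :
    lastAttr? attr (a ++ b) = (lastAttr? attr a).orElse (fun _ => lastAttr? attr b) := by
  induction a with
  | nil => rfl
  | cons ev rest ih =>
    simp only [List.cons_append, lastAttr?, ih]
    cases List.lookup attr ev <;> rfl

theorem go_eq_lastAttr? (event : List (String × String)) (attr : String)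
    (trace : List (List (String × String))) (v : String) :
    curValueGo event attr v trace = (lastAttr? attr (cutPrefix event trace).reverse).getD v := by
  induction trace generalizing v with
  | nil => rfl
  | cons ev rest ih =>
    have hv : (if (List.lookup attr ev).isSome then (List.lookup attr ev).getD v else v)
        = (List.lookup attr ev).getD v := by
      cases List.lookup attr ev <;> rfl
    simp only [curValueGo, cutPrefix]
    cases h : pyDictEq ev event
    · have h1 : (lastAttr? attr [ev]).getD v = (List.lookup attr ev).getD v := by
        cases hl : List.lookup attr ev <;> simp [lastAttr?, hl]
      simp [ih, hv, lastAttr?_append, h1]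
    · simp [lastAttr?, hv]

-- ===== VERDICT (by name: the statement is the Claim_ definition above) =====
theorem curValue_spec : Claim_equal_curValue := by
  intro trace event attr _
  unfold Spec_curValue curValue curValue_alt
  rw [go_eq_lastAttr?, lastAttr_eq_getD]
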